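-- pv_equiv track=rewrite | github.com/Prad-v/FlowGate | backend/services/flowgate-backend/app/services/otel_builder_service.py | _collect_upstream
-- ===== SOURCE A (Python) =====
-- from typing import Any, Dict, List, Literal, Optional, Set, Tuple
--
-- def _collect_upstream(start: str, reverse_graph: Dict[str, List[str]]) -> Set[str]:
--     visited: Set[str] = set()
--     stack = [start]
--     while stack:
--         current = stack.pop()
--         for parent in reverse_graph.get(current, []):
--             if parent not in visited:
--                 visited.add(parent)
--                 stack.append(parent)
--     return visited
-- ===== SOURCE B (Python) =====
-- def _collect_upstream(start, reverse_graph):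
--     # Round-based fixpoint closure: repeatedly add all parents of every
--     # discovered node (plus start) until no new node appears.
--     visited = set()
--     while True:
--         new = {p for u in visited | {start} for p in reverse_graph.get(u, [])}
--         if new <= visited:
--             return visited
--         visited |= new
-- ===== Notes on version B (the rewrite author's own statement) =====
-- stated objective: alternative
-- what changed: A's stack-based worklist traversal (pop a node, mark-and-push its unvisited parents) is replaced by a round-based fixpoint closure that repeatedly adds all parents of every discovered node (plus start) until a round produces nothing new.
import Mathlib
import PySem

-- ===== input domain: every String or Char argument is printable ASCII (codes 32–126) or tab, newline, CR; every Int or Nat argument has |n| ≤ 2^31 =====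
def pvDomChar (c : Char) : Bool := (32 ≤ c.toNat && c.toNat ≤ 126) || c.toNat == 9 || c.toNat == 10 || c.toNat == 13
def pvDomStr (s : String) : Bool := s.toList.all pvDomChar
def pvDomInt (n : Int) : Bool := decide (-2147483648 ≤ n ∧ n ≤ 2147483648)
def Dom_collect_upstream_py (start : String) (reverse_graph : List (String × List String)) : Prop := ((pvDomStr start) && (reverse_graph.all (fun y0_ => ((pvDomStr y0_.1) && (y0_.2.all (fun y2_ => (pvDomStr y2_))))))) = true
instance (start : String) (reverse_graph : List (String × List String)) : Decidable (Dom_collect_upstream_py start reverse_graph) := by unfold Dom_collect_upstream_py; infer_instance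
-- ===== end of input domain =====

-- B replaces A's worklist (stack) traversal by a round-based fixpoint closure
-- (repeatedly add all parents of every discovered node until nothing new appears);
-- objective: alternative algorithm, same exact set of upstream nodes.
-- Both Pythons return a *set*; Python's set iteration order is not modelled, so both
-- ports render the returned set canonically as its sorted element list.

-- ===== PORT A =====
-- reverse_graph.get(current, [])
def pvParents (g : List (String × List String)) (u : String) : List String :=
  PySem.Dict.getD (PySem.Dict.mk g) u []

-- the body of A's inner `for parent in …` loop: mark-and-push
def pvPush (s : PySem.Set String × List String) (parent : String) :
    PySem.Set String × List String :=
  if s.1.contains parent then s else (s.1.add parent, parent :: s.2)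

-- A's `while stack:` loop; the stack's top is the list head (Python pushes/pops at
-- the end, so pushing the parents left-to-right puts the last parent on top).
-- The fuel only makes the loop total; it is chosen large enough to never run out
-- (each loop iteration pops one element and every push marks a fresh node).
def pvLoopA (g : List (String × List String)) :
    Nat → List String → PySem.Set String → PySem.Set String
  | 0, _, visited => visited
  | _ + 1, [], visited => visited
  | fuel + 1, current :: rest, visited =>
      pvLoopA g fuel
        ((pvParents g current).foldl pvPush (visited, rest)).2
        ((pvParents g current).foldl pvPush (visited, rest)).1

def collect_upstream_py (start : String) (reverse_graph : List (String × List String)) : List String :=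
  PySem.List.sorted
    (pvLoopA reverse_graph
      (2 * (reverse_graph.flatMap (fun kv => kv.2)).length + 2)
      [start] PySem.Set.empty)
    (fun x => x)

-- ===== PORT B =====
-- one round: `{p for u in visited | {start} for p in reverse_graph.get(u, [])}`
def pvNewB (g : List (String × List String)) (start : String)
    (visited : PySem.Set String) : PySem.Set String :=
  (start :: visited).foldl
    (fun s u => PySem.Set.update s (pvParents g u)) PySem.Set.empty

-- B's `while True:` loop; fuel only makes it total (every non-final round grows
-- `visited` by at least one node, so it never runs out).
def pvLoopB (g : List (String × List String)) (start : String) :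
    Nat → PySem.Set String → PySem.Set String
  | 0, visited => visited
  | fuel + 1, visited =>
      if PySem.Set.issubset (pvNewB g start visited) visited then visited
      else pvLoopB g start fuel (PySem.Set.union visited (pvNewB g start visited))

def collect_upstream_py_alt (start : String) (reverse_graph : List (String × List String)) : List String :=
  PySem.List.sorted
    (pvLoopB reverse_graph start
      ((reverse_graph.flatMap (fun kv => kv.2)).length + 2)
      PySem.Set.empty)
    (fun x => x)

-- ===== PRECONDITION & SPEC =====
def Spec_collect_upstream_py (start : String) (reverse_graph : List (String × List String)) (out : List String) : Prop := out = collect_upstream_py_alt start reverse_graph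
instance (start : String) (reverse_graph : List (String × List String)) (out : List String) : Decidable (Spec_collect_upstream_py start reverse_graph out) := by unfold Spec_collect_upstream_py; infer_instance

-- ===== CLAIM (what is proved, stated in full; the proofs are below) =====
def Claim_equal_collect_upstream_py : Prop := ∀ (start : String) (reverse_graph : List (String × List String)), Dom_collect_upstream_py start reverse_graph → Spec_collect_upstream_py start reverse_graph (collect_upstream_py start reverse_graph)

-- ===== LEMMAS AND PROOFS =====

-- edge relation of the reverse graph: `p` is a parent of `u`
def pvE (g : List (String × List String)) (u p : String) : Prop :=
  p ∈ pvParents g u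

-- every value produced by a `.get` lookup occurs in some value list of the dict
theorem pvParents_subset_flatMap (g : List (String × List String)) (u x : String)
    (hx : x ∈ pvParents g u) : x ∈ g.flatMap (fun kv => kv.2) := by
  induction g with
  | nil => simp [pvParents, PySem.Dict.getD, PySem.Dict.get?, List.find?] at hx
  | cons kv t ih =>
      simp only [pvParents, PySem.Dict.getD, PySem.Dict.get?, List.find?] at hx ih
      simp only [List.flatMap_cons, List.mem_append]
      by_cases h : kv.1 == u
      · simp only [h, Option.map_some, Option.getD_some] at hx
        exact Or.inl hx
      · simp only [h] at hx
        simp only [List.flatMap] at ih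
        exact Or.inr (ih hx)

-- a nodup list included in `m` has at most `m.toFinset.card` elements
theorem pvLenLeCard (l m : List String) (hn : l.Nodup)
    (hsub : ∀ x ∈ l, x ∈ m) : l.length ≤ m.toFinset.card := by
  have h1 : l.toFinset.card = l.length := List.toFinset_card_of_nodup hn
  have h2 : l.toFinset ⊆ m.toFinset := by
    intro x hx
    rw [List.mem_toFinset] at hx ⊢
    exact hsub x hx
  calc l.length = l.toFinset.card := h1.symm
    _ ≤ m.toFinset.card := Finset.card_le_card h2

-- characterization of A's inner mark-and-push fold
theorem pvInner (ps : List String) (visited : PySem.Set String) (stack : List String) :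
    (∀ x, x ∈ (ps.foldl pvPush (visited, stack)).1 ↔ x ∈ visited ∨ x ∈ ps) ∧
    (∀ x, x ∈ (ps.foldl pvPush (visited, stack)).2 ↔ x ∈ stack ∨ (x ∈ ps ∧ x ∉ visited)) ∧
    (visited.Nodup → (ps.foldl pvPush (visited, stack)).1.Nodup) ∧
    ((ps.foldl pvPush (visited, stack)).1.length + stack.length
      = visited.length + (ps.foldl pvPush (visited, stack)).2.length) ∧
    visited.length ≤ (ps.foldl pvPush (visited, stack)).1.length := by
  induction ps generalizing visited stack with
  | nil => simp
  | cons p t ih =>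
      simp only [List.foldl_cons]
      by_cases hp : p ∈ visited
      · have hc : visited.contains p = true := (PySem.Set.contains_iff _ _).mpr hp
        rw [show pvPush (visited, stack) p = (visited, stack) by simp [pvPush, hp]]
        obtain ⟨i1, i2, i3, i4, i5⟩ := ih visited stack
        refine ⟨fun x => ?_, fun x => ?_, i3, i4, i5⟩
        · rw [i1]; simp only [List.mem_cons]
          constructor
          · rintro (h | h)
            · exact Or.inl h
            · exact Or.inr (Or.inr h)
          · rintro (h | rfl | h)
            · exact Or.inl h
            · exact Or.inl hp
            · exact Or.inr h
        · rw [i2]; simp only [List.mem_cons]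
          constructor
          · rintro (h | ⟨h1, h2⟩)
            · exact Or.inl h
            · exact Or.inr ⟨Or.inr h1, h2⟩
          · rintro (h | ⟨h1 | h1, h2⟩)
            · exact Or.inl h
            · exact absurd (h1 ▸ hp) h2
            · exact Or.inr ⟨h1, h2⟩
      · have hc : ¬ visited.contains p = true := by
          rw [PySem.Set.contains_iff]; exact hp
        rw [show pvPush (visited, stack) p = (visited.add p, p :: stack) by
          simp [pvPush, hp]]
        have hadd : visited.add p = visited ++ [p] := by
          simp [PySem.Set.add, hp]
        obtain ⟨i1, i2, i3, i4, i5⟩ := ih (visited.add p) (p :: stack)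
        refine ⟨fun x => ?_, fun x => ?_, fun hn => ?_, ?_, ?_⟩
        · rw [i1, hadd]
          simp only [List.mem_append, List.mem_cons, List.not_mem_nil, or_false]
          constructor
          · rintro ((h | rfl) | h)
            · exact Or.inl h
            · exact Or.inr (Or.inl rfl)
            · exact Or.inr (Or.inr h)
          · rintro (h | rfl | h)
            · exact Or.inl (Or.inl h)
            · exact Or.inl (Or.inr rfl)
            · exact Or.inr h
        · rw [i2, hadd]
          simp only [List.mem_cons, List.mem_append, List.not_mem_nil, or_false]
          constructor
          · rintro ((rfl | h) | ⟨h1, h2⟩)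
            · exact Or.inr ⟨Or.inl rfl, hp⟩
            · exact Or.inl h
            · exact Or.inr ⟨Or.inr h1, fun hv => h2 (Or.inl hv)⟩
          · rintro (h | ⟨h1 | h1, h2⟩)
            · exact Or.inl (Or.inr h)
            · exact Or.inl (Or.inl h1)
            · by_cases hxp : x = p
              · exact Or.inl (Or.inl hxp)
              · exact Or.inr ⟨h1, fun hv => by
                  rcases hv with hv | hv
                  · exact h2 hv
                  · exact hxp hv⟩
        · apply i3
          rw [hadd]
          simp only [List.nodup_append, hn, List.nodup_singleton, true_and]
          intro a ha b hb
          simp only [List.mem_singleton] at hb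
          subst hb
          exact fun h => hp (h ▸ ha)
        · have hlen : (visited.add p).length = visited.length + 1 := by
            rw [hadd]; simp
          simp only [List.length_cons] at i4 ⊢
          omega
        · have hlen : (visited.add p).length = visited.length + 1 := by
            rw [hadd]; simp
          omega

-- main invariant lemma for A's worklist loop: the final set is exactly the set of
-- nodes reachable from `start` in one or more reverse-graph steps
theorem pvLoopA_mem (g : List (String × List String)) (start : String) :
    ∀ (fuel : Nat) (stack : List String) (visited : PySem.Set String),
    visited.Nodup →
    (∀ v ∈ visited, Relation.TransGen (pvE g) start v) →
    (∀ v ∈ stack, v = start ∨ v ∈ visited) →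
    (∀ a b, pvE g a b → (a = start ∨ a ∈ visited) → b ∈ visited ∨ a ∈ stack) →
    (∀ v ∈ visited, v ∈ g.flatMap (fun kv => kv.2)) →
    stack.length + 2 * ((g.flatMap (fun kv => kv.2)).toFinset.card - visited.length) < fuel →
    (pvLoopA g fuel stack visited).Nodup ∧
    (∀ x, x ∈ pvLoopA g fuel stack visited ↔ Relation.TransGen (pvE g) start x) := by
  intro fuel
  induction fuel with
  | zero => intro stack visited _ _ _ _ _ hf; omega
  | succ fuel ih =>
      intro stack visited hnd hsound hstk hclose hsub hf
      match stack with
      | [] =>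
          refine ⟨by simpa [pvLoopA] using hnd, fun x => ?_⟩
          simp only [pvLoopA]
          constructor
          · exact hsound x
          · intro htg
            induction htg with
            | single h =>
                rcases hclose _ _ h (Or.inl rfl) with h' | h'
                · exact h'
                · simp at h'
            | tail _ h ihh =>
                rcases hclose _ _ h (Or.inr ihh) with h' | h'
                · exact h'
                · simp at h'
      | current :: rest =>
          obtain ⟨i1, i2, i3, i4, i5⟩ := pvInner (pvParents g current) visited rest
          set r := (pvParents g current).foldl pvPush (visited, rest) with hr
          have hcur : current = start ∨ current ∈ visited := hstk current (by simp)
          have hcurTG : ∀ p, pvE g current p → Relation.TransGen (pvE g) start p := by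
            intro p hp
            rcases hcur with rfl | hc
            · exact Relation.TransGen.single hp
            · exact Relation.TransGen.tail (hsound current hc) hp
          have hres : pvLoopA g (fuel + 1) (current :: rest) visited
              = pvLoopA g fuel r.2 r.1 := by
            simp only [pvLoopA, hr]
          rw [hres]
          apply ih
          · exact i3 hnd
          · intro v hv
            rcases (i1 v).mp hv with h | h
            · exact hsound v h
            · exact hcurTG v h
          · intro v hv
            rcases (i2 v).mp hv with h | ⟨h, _⟩
            · rcases hstk v (by simp [h]) with h' | h'
              · exact Or.inl h'
              · exact Or.inr ((i1 v).mpr (Or.inl h'))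
            · exact Or.inr ((i1 v).mpr (Or.inr h))
          · intro a b hab ha
            by_cases hb : b ∈ r.1
            · exact Or.inl hb
            · have hbv : b ∉ visited := fun h => hb ((i1 b).mpr (Or.inl h))
              by_cases hac : a = current
              · exact absurd ((i1 b).mpr (Or.inr (by rw [← hac]; exact hab))) hb
              · rcases ha with rfl | har
                · rcases hclose a b hab (Or.inl rfl) with h | h
                  · exact absurd h hbv
                  · rcases List.mem_cons.mp h with h' | h'
                    · exact absurd h' hac
                    · exact Or.inr ((i2 a).mpr (Or.inl h'))
                · rcases (i1 a).mp har with h | h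
                  · rcases hclose a b hab (Or.inr h) with h' | h'
                    · exact absurd h' hbv
                    · rcases List.mem_cons.mp h' with h'' | h''
                      · exact absurd h'' hac
                      · exact Or.inr ((i2 a).mpr (Or.inl h''))
                  · by_cases hav : a ∈ visited
                    · rcases hclose a b hab (Or.inr hav) with h' | h'
                      · exact absurd h' hbv
                      · rcases List.mem_cons.mp h' with h'' | h''
                        · exact absurd h'' hac
                        · exact Or.inr ((i2 a).mpr (Or.inl h''))
                    · exact Or.inr ((i2 a).mpr (Or.inr ⟨h, hav⟩))
          · intro v hv
            rcases (i1 v).mp hv with h | h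
            · exact hsub v h
            · exact pvParents_subset_flatMap g current v h
          · have hcard : r.1.length ≤ (g.flatMap (fun kv => kv.2)).toFinset.card := by
              apply pvLenLeCard _ _ (i3 hnd)
              intro v hv
              rcases (i1 v).mp hv with h | h
              · exact hsub v h
              · exact pvParents_subset_flatMap g current v h
            simp only [List.length_cons] at hf
            omega

-- characterization of B's one-round fold (all parents of `start :: visited`)
theorem pvNewB_mem (g : List (String × List String)) (start : String)
    (visited : PySem.Set String) :
    (∀ x, x ∈ pvNewB g start visited ↔ ∃ u ∈ start :: visited, pvE g u x) ∧
    (pvNewB g start visited).Nodup := by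
  have key : ∀ (us : List String) (s0 : PySem.Set String),
      (∀ x, x ∈ us.foldl (fun s u => PySem.Set.update s (pvParents g u)) s0
        ↔ x ∈ s0 ∨ ∃ u ∈ us, pvE g u x) ∧
      (s0.Nodup → (us.foldl (fun s u => PySem.Set.update s (pvParents g u)) s0).Nodup) := by
    intro us
    induction us with
    | nil => intro s0; simp
    | cons u t iht =>
        intro s0
        simp only [List.foldl_cons]
        obtain ⟨j1, j2⟩ := iht (PySem.Set.update s0 (pvParents g u))
        refine ⟨fun x => ?_, fun hn => j2 (PySem.Set.nodup_update _ _ hn)⟩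
        rw [j1, PySem.Set.mem_update]
        simp only [List.mem_cons, pvE, pvParents]
        constructor
        · rintro ((h | h) | ⟨w, hw, hwx⟩)
          · exact Or.inl h
          · exact Or.inr ⟨u, Or.inl rfl, h⟩
          · exact Or.inr ⟨w, Or.inr hw, hwx⟩
        · rintro (h | ⟨w, (rfl | hw), hwx⟩)
          · exact Or.inl (Or.inl h)
          · exact Or.inl (Or.inr hwx)
          · exact Or.inr ⟨w, hw, hwx⟩
  obtain ⟨j1, j2⟩ := key (start :: visited) PySem.Set.empty
  exact ⟨fun x => by simpa [pvNewB, PySem.Set.empty] using j1 x,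
    by simpa [pvNewB] using j2 (by simp [PySem.Set.empty])⟩

-- main invariant lemma for B's fixpoint loop
theorem pvLoopB_mem (g : List (String × List String)) (start : String) :
    ∀ (fuel : Nat) (visited : PySem.Set String),
    visited.Nodup →
    (∀ v ∈ visited, Relation.TransGen (pvE g) start v) →
    (∀ v ∈ visited, v ∈ g.flatMap (fun kv => kv.2)) →
    (g.flatMap (fun kv => kv.2)).toFinset.card - visited.length < fuel →
    (pvLoopB g start fuel visited).Nodup ∧
    (∀ x, x ∈ pvLoopB g start fuel visited ↔ Relation.TransGen (pvE g) start x) := by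
  intro fuel
  induction fuel with
  | zero => intro visited _ _ _ hf; omega
  | succ fuel ih =>
      intro visited hnd hsound hsub hf
      obtain ⟨n1, n2⟩ := pvNewB_mem g start visited
      by_cases hs : PySem.Set.issubset (pvNewB g start visited) visited = true
      · have hres : pvLoopB g start (fuel + 1) visited = visited := by
          simp only [pvLoopB, hs, if_true]
        rw [hres]
        have hcl : ∀ x ∈ pvNewB g start visited, x ∈ visited :=
          (PySem.Set.issubset_iff _ _).mp hs
        refine ⟨hnd, fun x => ⟨hsound x, fun htg => ?_⟩⟩
        induction htg with
        | single h => exact hcl _ ((n1 _).mpr ⟨start, by simp, h⟩)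
        | tail _ h ihh => exact hcl _ ((n1 _).mpr ⟨_, by simp [ihh], h⟩)
      · have hres : pvLoopB g start (fuel + 1) visited
            = pvLoopB g start fuel (PySem.Set.union visited (pvNewB g start visited)) := by
          simp [pvLoopB, hs]
        rw [hres]
        have hnwTG : ∀ x ∈ pvNewB g start visited, Relation.TransGen (pvE g) start x := by
          intro x hx
          obtain ⟨u, hu, hux⟩ := (n1 x).mp hx
          rcases List.mem_cons.mp hu with rfl | hu'
          · exact Relation.TransGen.single hux
          · exact Relation.TransGen.tail (hsound u hu') hux
        have hund : (PySem.Set.union visited (pvNewB g start visited)).Nodup :=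
          PySem.Set.nodup_union _ _ hnd
        have husub : ∀ v ∈ PySem.Set.union visited (pvNewB g start visited),
            v ∈ g.flatMap (fun kv => kv.2) := by
          intro v hv
          rcases (PySem.Set.mem_union _ _ _).mp hv with h | h
          · exact hsub v h
          · obtain ⟨u, _, hux⟩ := (n1 v).mp h
            exact pvParents_subset_flatMap g u v hux
        -- strict growth: some new node is outside visited
        obtain ⟨w, hw, hwv⟩ : ∃ w ∈ pvNewB g start visited, w ∉ visited := by
          by_contra hcon
          apply hs
          rw [PySem.Set.issubset_iff]
          intro x hx
          by_contra hxv
          exact hcon ⟨x, hx, hxv⟩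
        have hgrow : visited.length < (PySem.Set.union visited (pvNewB g start visited)).length := by
          have hvsub : visited.toFinset ⊆ (PySem.Set.union visited (pvNewB g start visited)).toFinset := by
            intro x hx
            rw [List.mem_toFinset] at hx ⊢
            exact (PySem.Set.mem_union _ _ _).mpr (Or.inl hx)
          have hins : insert w visited.toFinset
              ⊆ (PySem.Set.union visited (pvNewB g start visited)).toFinset := by
            intro x hx
            rcases Finset.mem_insert.mp hx with rfl | hx'
            · rw [List.mem_toFinset]
              exact (PySem.Set.mem_union _ _ _).mpr (Or.inr hw)
            · exact hvsub hx'
          have h1 : (insert w visited.toFinset).card = visited.toFinset.card + 1 :=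
            Finset.card_insert_of_notMem (by rw [List.mem_toFinset]; exact hwv)
          have h2 := Finset.card_le_card hins
          rw [List.toFinset_card_of_nodup hnd] at h1
          rw [List.toFinset_card_of_nodup hund] at h2
          omega
        have hcard : (PySem.Set.union visited (pvNewB g start visited)).length
            ≤ (g.flatMap (fun kv => kv.2)).toFinset.card :=
          pvLenLeCard _ _ hund husub
        obtain ⟨k1, k2⟩ := ih (PySem.Set.union visited (pvNewB g start visited))
          hund
          (fun v hv => by
            rcases (PySem.Set.mem_union _ _ _).mp hv with h | h
            · exact hsound v h
            · exact hnwTG v h)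
          husub
          (by omega)
        exact ⟨k1, k2⟩

-- ===== VERDICT (by name: the statement is the Claim_ definition above) =====
theorem collect_upstream_py_spec : Claim_equal_collect_upstream_py := by
  intro start g _
  unfold Spec_collect_upstream_py collect_upstream_py collect_upstream_py_alt
  have hPcard : (g.flatMap (fun kv => kv.2)).toFinset.card
      ≤ (g.flatMap (fun kv => kv.2)).length := List.toFinset_card_le _
  obtain ⟨a1, a2⟩ := pvLoopA_mem g start
    (2 * (g.flatMap (fun kv => kv.2)).length + 2) [start] PySem.Set.empty
    (by simp [PySem.Set.empty])
    (by simp [PySem.Set.empty])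
    (by intro v hv; simp at hv; exact Or.inl hv)
    (by intro a b _ ha
        rcases ha with rfl | h
        · exact Or.inr (by simp)
        · simp [PySem.Set.empty] at h)
    (by simp [PySem.Set.empty])
    (by simp only [PySem.Set.empty, List.length_singleton, List.length_nil]; omega)
  obtain ⟨b1, b2⟩ := pvLoopB_mem g start
    ((g.flatMap (fun kv => kv.2)).length + 2) PySem.Set.empty
    (by simp [PySem.Set.empty])
    (by simp [PySem.Set.empty])
    (by simp [PySem.Set.empty])
    (by simp only [PySem.Set.empty, List.length_nil]; omega)
  apply PySem.List.sorted_eq_sorted_of_perm _ _ (fun x => x) (fun _ _ h => h)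
  rw [List.perm_ext_iff_of_nodup a1 b1]
  intro x
  rw [a2 x, b2 x]
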